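-- pv_equiv track=rewrite | github.com/mwshinn/blog | res/shuffle/cards.py | get_cluster_pattern
-- ===== SOURCE A (Python) =====
-- def get_cluster_pattern(hand):
--     hand_rank = [r for s,r in hand]
--     cluster_sizes = []
--     cur_cluster_size = 1
--     cur_cluster_rank = hand_rank[0]
--     for c in hand_rank[1:]:
--         if abs(c-cur_cluster_rank) <= 1:
--             cur_cluster_rank = c
--             cur_cluster_size += 1
--         else:
--             cluster_sizes.append(cur_cluster_size)
--             cur_cluster_size = 1
--             cur_cluster_rank = c
--     cluster_sizes.append(cur_cluster_size)
--     return tuple(sorted(cluster_sizes))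
-- ===== SOURCE B (Python) =====
-- def get_cluster_pattern(hand):
--     ranks = [r for _, r in hand]
--     bounds = [0] + [i for i, (a, b) in enumerate(zip(ranks, ranks[1:]), 1) if abs(b - a) > 1] + [len(ranks)]
--     return tuple(sorted(y - x for x, y in zip(bounds, bounds[1:])))
-- ===== Notes on version B (the rewrite author's own statement) =====
-- stated objective: alternative
-- what changed: B replaces A's running cluster accumulator (current size/rank state mutated per element) by a break-index table: it lists the positions where adjacent ranks jump by more than 1, brackets them with 0 and len, and takes consecutive differences as the cluster sizes.
-- outside the precondition, e.g. on get_cluster_pattern([]): A raises IndexError, B returns (0,)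
import Mathlib
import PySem

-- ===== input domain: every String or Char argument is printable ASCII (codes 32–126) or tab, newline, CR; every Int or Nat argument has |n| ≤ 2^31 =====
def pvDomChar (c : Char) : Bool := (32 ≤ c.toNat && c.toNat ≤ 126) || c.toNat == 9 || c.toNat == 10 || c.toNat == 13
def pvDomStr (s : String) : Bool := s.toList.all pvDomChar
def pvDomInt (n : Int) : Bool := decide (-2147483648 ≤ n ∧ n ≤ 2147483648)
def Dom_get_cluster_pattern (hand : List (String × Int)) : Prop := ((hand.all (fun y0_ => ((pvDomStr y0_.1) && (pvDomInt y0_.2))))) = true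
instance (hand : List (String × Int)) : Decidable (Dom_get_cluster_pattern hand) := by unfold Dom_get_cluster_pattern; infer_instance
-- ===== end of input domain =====

-- B computes cluster sizes as gaps between break indices instead of A's running
-- size/rank accumulator; same cost (objective: alternative). Equivalence is about
-- the return value; neither program mutates its argument.

-- ===== PORT A =====
-- loop body of A's for-loop (state: (cluster_sizes, cur_cluster_size, cur_cluster_rank))
def pvStepA (st : List Int × Int × Int) (c : Int) : List Int × Int × Int :=
  if |c - st.2.2| ≤ 1 then (st.1, st.2.1 + 1, c) else (st.1 ++ [st.2.1], 1, c)

def get_cluster_pattern (hand : List (String × Int)) : List Int :=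
  let hand_rank := hand.map (fun p => p.2)
  match PySem.List.pyGet? hand_rank 0 with
  | none => []  -- hand_rank[0] raises IndexError on an empty hand; excluded by Pre_
  | some r0 =>
    let st := (hand_rank.tail).foldl pvStepA ([], 1, r0)  -- hand_rank[1:] = tail
    PySem.List.sorted (st.1 ++ [st.2.1]) (fun x => x) false

-- ===== PORT B =====
-- (y - x for x, y in zip(bounds, bounds[1:]))
def pvDiffs (bounds : List Int) : List Int :=
  (bounds.zip bounds.tail).map (fun p => p.2 - p.1)

def get_cluster_pattern_alt (hand : List (String × Int)) : List Int :=
  let ranks := hand.map (fun p => p.2)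
  -- bounds = [0] + [i for i,(a,b) in enumerate(zip(ranks, ranks[1:]), 1) if abs(b-a) > 1] + [len(ranks)]
  let bounds := 0 ::
    ((PySem.List.enumerate (ranks.zip ranks.tail) 1).filter
        (fun q => decide (1 < |q.2.2 - q.2.1|))).map (fun q => q.1)
    ++ [(ranks.length : Int)]
  PySem.List.sorted (pvDiffs bounds) (fun x => x) false

-- ===== PRECONDITION & SPEC =====
-- A raises IndexError (hand_rank[0]) on the empty hand; Pre_ excludes exactly that input.
def Pre_get_cluster_pattern (hand : List (String × Int)) : Prop := hand ≠ []
instance (hand : List (String × Int)) : Decidable (Pre_get_cluster_pattern hand) := by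
  unfold Pre_get_cluster_pattern; infer_instance

def pvWitness_get_cluster_pattern : (List (String × Int)) := [("S", 5), ("H", 6), ("D", 2)]

def Spec_get_cluster_pattern (hand : List (String × Int)) (out : List Int) : Prop := out = get_cluster_pattern_alt hand
instance (hand : List (String × Int)) (out : List Int) : Decidable (Spec_get_cluster_pattern hand out) := by unfold Spec_get_cluster_pattern; infer_instance

-- ===== CLAIM (what is proved, stated in full; the proofs are below) =====
def Claim_equal_get_cluster_pattern : Prop := ∀ (hand : List (String × Int)), Dom_get_cluster_pattern hand → Pre_get_cluster_pattern hand → Spec_get_cluster_pattern hand (get_cluster_pattern hand)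

-- ===== LEMMAS AND PROOFS =====

lemma pvDiffs_cons_cons (a b : Int) (rest : List Int) :
    pvDiffs (a :: b :: rest) = (b - a) :: pvDiffs (b :: rest) := rfl

/-- Loop invariant: A's accumulator run over `rest` produces the same unsorted size
list as B's bracketed break-index differences, provided `j = p + size` (the next
adjacency index equals the left boundary plus the current cluster size). -/
lemma pv_main (rest : List Int) : ∀ (prev : Int) (sizes : List Int) (size p j : Int),
    j = p + size →
    (rest.foldl pvStepA (sizes, size, prev)).1 ++ [(rest.foldl pvStepA (sizes, size, prev)).2.1]
      = sizes ++ pvDiffs (p ::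
          ((PySem.List.enumerate ((prev :: rest).zip rest) j).filter
              (fun q => decide (1 < |q.2.2 - q.2.1|))).map (fun q => q.1)
          ++ [j + (rest.length : Int)]) := by
  induction rest with
  | nil =>
    intro prev sizes size p j hj
    simp [pvDiffs, hj]
  | cons c cs ih =>
    intro prev sizes size p j hj
    have hz : (prev :: c :: cs).zip (c :: cs) = (prev, c) :: (c :: cs).zip cs := rfl
    rw [hz, PySem.List.enumerate_cons]
    by_cases h : |c - prev| ≤ 1
    · have hfilter : ¬ (1 < |c - prev|) := by omega
      have this := ih c sizes (size + 1) p (j + 1) (by omega)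
      have hc : j + 1 + (cs.length : Int) = j + ((cs.length + 1 : Nat) : Int) := by
        push_cast; ring
      rw [hc] at this
      simpa [pvStepA, h, hfilter] using this
    · have hfilter : (1 < |c - prev|) := by omega
      have this := ih c (sizes ++ [size]) 1 j (j + 1) (by omega)
      have hc : j + 1 + (cs.length : Int) = j + ((cs.length + 1 : Nat) : Int) := by
        push_cast; ring
      rw [hc] at this
      simp only [List.foldl_cons, pvStepA, List.filter_cons, h, hfilter, decide_true,
        if_true, if_false, List.map_cons, List.length_cons, List.cons_append] at this ⊢
      rw [pvDiffs_cons_cons, show j - p = size by omega]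
      rw [this]
      simp

-- ===== VERDICT (by name: the statement is the Claim_ definition above) =====
theorem get_cluster_pattern_spec : Claim_equal_get_cluster_pattern := by
  intro hand _ hpre
  unfold Spec_get_cluster_pattern
  match hand with
  | [] => exact absurd rfl hpre
  | h :: t =>
    unfold get_cluster_pattern get_cluster_pattern_alt
    have hget : PySem.List.pyGet? (h.2 :: t.map (fun p => p.2)) 0 = some h.2 := by
      simp [PySem.List.pyGet?, PySem.List.pyIdx?]
    simp only [List.map_cons, List.tail_cons, hget]
    have key := pv_main (t.map (fun p => p.2)) h.2 [] 1 0 1 (by omega)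
    simp only [List.nil_append] at key
    have hc : (1 : Int) + ((t.map (fun p => p.2)).length : Int)
        = (((h.2 :: t.map (fun p => p.2)).length : Nat) : Int) := by
      simp; omega
    rw [hc] at key
    rw [key]
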